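-- pv_equiv track=rewrite | github.com/vidhiJain/transformer_task_planner | src/temporal_task_planner/envs/dishwasher_env_utils.py | sort_utensils_by_category
-- ===== SOURCE A (Python) =====
-- from typing import Dict, List, Tuple
--
-- def sort_utensils_by_category(
--     utensil_name_list: List[str], ordering_by_pref: List[str]
-- ) -> List:
--     sorted_list = []
--     for cat in ordering_by_pref:
--         for utensil in utensil_name_list:
--             utensil_category = utensil.split(":")[0]
--             if utensil_category == cat:
--                 sorted_list.append(utensil)
--     return sorted_list
-- ===== SOURCE B (Python) =====
-- def sort_utensils_by_category(utensil_name_list, ordering_by_pref):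
--     buckets = {}
--     for utensil in utensil_name_list:
--         buckets.setdefault(utensil.split(":")[0], []).append(utensil)
--     result = []
--     for cat in ordering_by_pref:
--         result.extend(buckets.get(cat, []))
--     return result
-- ===== Notes on version B (the rewrite author's own statement) =====
-- stated objective: faster
-- what changed: Replaced the nested per-preference scan of all utensils with a single bucketing pass into a dict keyed by category, then one emit pass over the preference list.
import Mathlib
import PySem

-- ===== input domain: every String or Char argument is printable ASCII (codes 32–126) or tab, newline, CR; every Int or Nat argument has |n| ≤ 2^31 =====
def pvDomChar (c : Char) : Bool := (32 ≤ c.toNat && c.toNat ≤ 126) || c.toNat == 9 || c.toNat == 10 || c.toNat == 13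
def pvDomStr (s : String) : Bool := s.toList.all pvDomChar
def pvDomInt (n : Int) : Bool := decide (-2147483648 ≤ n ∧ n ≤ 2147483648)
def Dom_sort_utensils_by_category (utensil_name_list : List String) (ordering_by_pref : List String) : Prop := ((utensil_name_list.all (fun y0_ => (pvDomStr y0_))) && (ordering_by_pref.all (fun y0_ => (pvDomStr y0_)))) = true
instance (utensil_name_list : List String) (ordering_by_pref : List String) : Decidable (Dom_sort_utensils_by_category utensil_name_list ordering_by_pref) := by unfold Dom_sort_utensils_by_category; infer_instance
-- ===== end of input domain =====

-- B buckets utensils by category in one dict pass and emits per preference, instead of A's rescans of the whole list per preference.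

-- utensil.split(":")[0]  (split with a nonempty separator always yields a nonempty list, so index 0 is in range)
def pvCat (u : String) : String := PySem.List.pyGetD ((PySem.Str.split? u ":").getD []) 0 ""

-- ===== PORT A =====
def sort_utensils_by_category (utensil_name_list : List String) (ordering_by_pref : List String) : List String :=
  ordering_by_pref.foldl
    (fun sorted_list cat =>
      utensil_name_list.foldl
        (fun sorted_list utensil =>
          if pvCat utensil == cat then sorted_list ++ [utensil] else sorted_list)
        sorted_list)
    []

-- ===== PORT B =====
def sort_utensils_by_category_alt (utensil_name_list : List String) (ordering_by_pref : List String) : List String :=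
  let buckets : PySem.Dict String (List String) :=
    utensil_name_list.foldl (fun d utensil => d.modify (pvCat utensil) [] (· ++ [utensil])) PySem.Dict.empty
  ordering_by_pref.foldl (fun result cat => result ++ buckets.getD cat []) []

-- ===== PRECONDITION & SPEC =====
def Spec_sort_utensils_by_category (utensil_name_list : List String) (ordering_by_pref : List String) (out : List String) : Prop := out = sort_utensils_by_category_alt utensil_name_list ordering_by_pref
instance (utensil_name_list : List String) (ordering_by_pref : List String) (out : List String) : Decidable (Spec_sort_utensils_by_category utensil_name_list ordering_by_pref out) := by unfold Spec_sort_utensils_by_category; infer_instance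

-- ===== CLAIM (what is proved, stated in full; the proofs are below) =====
def Claim_equal_sort_utensils_by_category : Prop := ∀ (utensil_name_list : List String) (ordering_by_pref : List String), Dom_sort_utensils_by_category utensil_name_list ordering_by_pref → Spec_sort_utensils_by_category utensil_name_list ordering_by_pref (sort_utensils_by_category utensil_name_list ordering_by_pref)

-- ===== LEMMAS AND PROOFS =====

-- B's bucket for a category is exactly A's inner filtering pass over the utensil list.
theorem pv_bucket_eq_filter (us : List String) (c : String) :
    (us.foldl (fun d utensil => d.modify (pvCat utensil) [] (· ++ [utensil])) PySem.Dict.empty).getD c []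
      = us.filter (fun u => pvCat u == c) := by
  have h := PySem.Dict.getD_foldl_modify_append (l := us.map (fun u => (pvCat u, u)))
    (d := (PySem.Dict.empty : PySem.Dict String (List String))) (c := c)
  rw [List.foldl_map] at h
  rw [List.filter_map] at h
  simpa [Function.comp_def] using h

theorem pv_inner_eq (us : List String) (c : String) (acc : List String) :
    us.foldl (fun sl u => if pvCat u == c then sl ++ [u] else sl) acc
      = acc ++ us.filter (fun u => pvCat u == c) := by
  simpa using PySem.List.foldl_append_if (fun u => pvCat u == c) id us acc

-- ===== VERDICT (by name: the statement is the Claim_ definition above) =====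
theorem sort_utensils_by_category_spec : Claim_equal_sort_utensils_by_category := by
  intro us prefs _
  unfold Spec_sort_utensils_by_category sort_utensils_by_category sort_utensils_by_category_alt
  have h1 : (fun (sl : List String) cat =>
      us.foldl (fun sl u => if pvCat u == cat then sl ++ [u] else sl) sl)
      = fun (sl : List String) cat => sl ++ us.filter (fun u => pvCat u == cat) := by
    funext sl cat; exact pv_inner_eq us cat sl
  have h2 : (fun (result : List String) cat =>
      result ++ (us.foldl (fun d utensil => d.modify (pvCat utensil) [] (· ++ [utensil])) PySem.Dict.empty).getD cat [])
      = fun (result : List String) cat => result ++ us.filter (fun u => pvCat u == cat) := by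
    funext result cat; rw [pv_bucket_eq_filter]
  rw [h1]
  show _ = List.foldl (fun result cat => result ++ (us.foldl (fun d utensil => d.modify (pvCat utensil) [] (· ++ [utensil])) PySem.Dict.empty).getD cat []) [] prefs
  rw [h2]
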